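-- pv_equiv track=rewrite | github.com/miliar/Code_Jam_Webscraper | solutions_python/Problem_181/1649.py | funky_sort
-- ===== SOURCE A (Python) =====
-- def funky_sort(s):
--     temp = [s[0]]
--     for character in s[1:]:
--         if character >= temp[0]:
--             temp = [character] + temp
--         else:
--             temp.append(character)
--     return ''.join(temp)
-- ===== SOURCE B (Python) =====
-- def funky_sort(s):
--     # Pass 1: prefix-maximum table pm, pm[i] = max(s[:i+1]).
--     pm = []
--     m = s[0]
--     for c in s:
--         if c > m:
--             m = c
--         pm.append(m)
--     # s[i] (i>=1) is a "record" iff s[i] >= pm[i-1]; zip pairs s[i] with pm[i-1].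
--     pairs = list(zip(s[1:], pm))
--     rec = [c for c, p in pairs if c >= p]
--     non = [c for c, p in pairs if c < p]
--     return ''.join(rec[::-1]) + s[0] + ''.join(non)
-- ===== Notes on version B (the rewrite author's own statement) =====
-- stated objective: alternative
-- what changed: B is staged: it first builds a prefix-maximum table in one pass, then classifies each character against the table entry via zip and two comprehensions, and assembles reversed records + first char + non-records; A instead runs one online loop whose single list doubles as max tracker (temp[0]) and output, prepending new maxima with O(n) list copies.
import Mathlib
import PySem

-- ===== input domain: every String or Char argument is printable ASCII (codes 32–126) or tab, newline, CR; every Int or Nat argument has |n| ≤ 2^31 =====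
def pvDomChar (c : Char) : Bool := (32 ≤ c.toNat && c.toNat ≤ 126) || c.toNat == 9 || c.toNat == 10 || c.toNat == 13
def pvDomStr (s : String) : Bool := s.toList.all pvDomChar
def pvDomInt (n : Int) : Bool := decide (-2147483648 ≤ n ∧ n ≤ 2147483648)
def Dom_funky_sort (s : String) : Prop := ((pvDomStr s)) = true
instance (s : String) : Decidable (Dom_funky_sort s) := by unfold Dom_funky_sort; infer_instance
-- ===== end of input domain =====

-- B replaces A's online loop (one list that is both output and max tracker, with O(n) prepends)
-- by staged passes: a prefix-maximum table, zip + two comprehensions, and one final assembly (alternative decomposition).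

-- ===== PORT A =====
-- A's loop: temp starts [s[0]] and stays nonempty, so temp[0] is read with headD (exact here).
def funkyA (temp : List Char) (rest : List Char) : List Char :=
  match rest with
  | [] => temp
  | c :: cs =>
      if temp.headD ' ' ≤ c then funkyA (c :: temp) cs
      else funkyA (temp ++ [c]) cs

def funky_sort (s : String) : String :=
  match s.toList with
  | [] => ""  -- unreachable under Pre_funky_sort (Python A raises IndexError on "")
  | c :: rest => String.mk (funkyA [c] rest)

-- ===== PORT B =====
-- Source B pass 1: the foldl carries (m, pm) exactly like the Python loop.
def funky_sort_alt (s : String) : String :=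
  match s.toList with
  | [] => ""  -- unreachable under Pre_funky_sort (Python B raises IndexError on "")
  | s0 :: rest =>
      let st := (s0 :: rest).foldl
        (fun (acc : Char × List Char) c =>
          let m := if acc.1 < c then c else acc.1
          (m, acc.2 ++ [m])) (s0, [])
      let pairs := rest.zip st.2
      let recs := (pairs.filter (fun p => p.2 ≤ p.1)).map Prod.fst
      let non := (pairs.filter (fun p => p.1 < p.2)).map Prod.fst
      String.mk (recs.reverse ++ s0 :: non)

-- ===== PRECONDITION & SPEC =====
-- Pre_ excludes only the empty string, on which both Pythons raise IndexError (s[0]).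
def Pre_funky_sort (s : String) : Prop := s ≠ ""
instance (s : String) : Decidable (Pre_funky_sort s) := by unfold Pre_funky_sort; infer_instance
def pvWitness_funky_sort : String := "cab"
def Spec_funky_sort (s : String) (out : String) : Prop := out = funky_sort_alt s
instance (s : String) (out : String) : Decidable (Spec_funky_sort s out) := by unfold Spec_funky_sort; infer_instance

-- ===== CLAIM (what is proved, stated in full; the proofs are below) =====
def Claim_equal_funky_sort : Prop := ∀ (s : String), Dom_funky_sort s → Pre_funky_sort s → Spec_funky_sort s (funky_sort s)

-- ===== LEMMAS AND PROOFS =====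

-- Proof-side recursive characterisation of the split into records / non-records
-- (chronological order; B reverses the records at the end).
def splitRec (m : Char) : List Char → List Char × List Char
  | [] => ([], [])
  | c :: cs =>
      if m ≤ c then (c :: (splitRec c cs).1, (splitRec c cs).2)
      else ((splitRec m cs).1, c :: (splitRec m cs).2)

-- Proof-side prefix-maximum sequence (what B's first pass appends after the initial m).
def pms (m : Char) : List Char → List Char
  | [] => []
  | c :: cs => (if m < c then c else m) :: pms (if m < c then c else m) cs

theorem funkyA_split (rest : List Char) : ∀ (m : Char) (fr bk : List Char),
    funkyA (m :: (fr ++ bk)) rest =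
      (splitRec m rest).1.reverse ++ m :: fr ++ bk ++ (splitRec m rest).2 := by
  induction rest with
  | nil => intro m fr bk; simp [funkyA, splitRec]
  | cons c cs ih =>
      intro m fr bk
      simp only [funkyA, List.headD, splitRec]
      by_cases h : m ≤ c
      · simp only [h, if_pos]
        have := ih c (m :: fr) bk
        simp only [List.cons_append] at this
        simp [this]
      · simp only [h, if_neg, not_false_iff]
        simpa using ih m fr (bk ++ [c])

theorem foldl_pms (l : List Char) : ∀ (m : Char) (acc : List Char),
    (l.foldl (fun (a : Char × List Char) c =>
      (if a.1 < c then c else a.1, a.2 ++ [if a.1 < c then c else a.1])) (m, acc)).2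
      = acc ++ pms m l := by
  induction l with
  | nil => intro m acc; simp [pms]
  | cons c cs ih =>
      intro m acc
      simp only [List.foldl_cons, pms]
      rw [ih]
      simp

theorem zip_split (rest : List Char) : ∀ (m : Char),
    (((rest.zip (m :: pms m rest)).filter (fun p => p.2 ≤ p.1)).map Prod.fst
      = (splitRec m rest).1)
    ∧ (((rest.zip (m :: pms m rest)).filter (fun p => p.1 < p.2)).map Prod.fst
      = (splitRec m rest).2) := by
  induction rest with
  | nil => intro m; simp [splitRec]
  | cons c cs ih =>
      intro m
      by_cases h : m ≤ c
      · have hm : (if m < c then c else m) = c := by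
          by_cases h' : m < c
          · simp [h']
          · have : m = c := le_antisymm h (not_lt.mp h')
            simp [this]
        refine ⟨?_, ?_⟩ <;>
          · simp only [List.zip_cons_cons, pms, hm, List.filter_cons, splitRec, h, if_pos]
            simp [not_lt.mpr h, (ih c).1, (ih c).2]
      · have hc : c < m := not_le.mp h
        have hm : (if m < c then c else m) = m := by simp [not_lt.mpr hc.le]
        refine ⟨?_, ?_⟩ <;>
          · simp only [List.zip_cons_cons, pms, hm, List.filter_cons, splitRec, h, if_neg,
              not_false_iff]
            simp [hc, (ih m).1, (ih m).2]

-- ===== VERDICT (by name: the statement is the Claim_ definition above) =====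
theorem funky_sort_spec : Claim_equal_funky_sort := by
  intro s _ _
  unfold Spec_funky_sort funky_sort funky_sort_alt
  cases hs : s.toList with
  | nil => rfl
  | cons s0 rest =>
      simp only [List.foldl_cons, if_neg (lt_irrefl s0)]
      rw [foldl_pms rest s0 ([] ++ [s0])]
      have hA := funkyA_split rest s0 [] []
      simp only [List.append_nil, List.nil_append] at hA ⊢
      have hz := zip_split rest s0
      simp only [List.singleton_append] at ⊢
      rw [hz.1, hz.2, hA]
      simp
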